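-- pv_equiv track=rewrite | github.com/Nahtreom/Manim-Bench | scripts/padvc.py | _merge_runs
-- ===== SOURCE A (Python) =====
-- def _merge_runs(runs, gap_max):
--     if not runs:
--         return []
--     merged = [runs[0]]
--     for start, end in runs[1:]:
--         prev_start, prev_end = merged[-1]
--         if start - prev_end - 1 <= gap_max:
--             merged[-1] = (prev_start, end)
--         else:
--             merged.append((start, end))
--     return merged
-- ===== SOURCE B (Python) =====
-- def _merge_runs(runs, gap_max):
--     # Recursive group-at-a-time: scan forward to find where the first
--     # mergeable chain of runs ends, emit its span, recurse on the rest.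
--     if not runs:
--         return []
--     i = 1
--     while i < len(runs) and runs[i][0] - runs[i-1][1] - 1 <= gap_max:
--         i += 1
--     return [(runs[0][0], runs[i-1][1])] + _merge_runs(runs[i:], gap_max)
-- ===== Notes on version B (the rewrite author's own statement) =====
-- stated objective: alternative
-- what changed: B is recursive group-at-a-time: it first scans ahead to find the full extent of the leading mergeable chain, emits that one span, and recurses on the remaining runs, instead of A's flat single loop that rewrites merged[-1] per element.
import Mathlib
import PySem

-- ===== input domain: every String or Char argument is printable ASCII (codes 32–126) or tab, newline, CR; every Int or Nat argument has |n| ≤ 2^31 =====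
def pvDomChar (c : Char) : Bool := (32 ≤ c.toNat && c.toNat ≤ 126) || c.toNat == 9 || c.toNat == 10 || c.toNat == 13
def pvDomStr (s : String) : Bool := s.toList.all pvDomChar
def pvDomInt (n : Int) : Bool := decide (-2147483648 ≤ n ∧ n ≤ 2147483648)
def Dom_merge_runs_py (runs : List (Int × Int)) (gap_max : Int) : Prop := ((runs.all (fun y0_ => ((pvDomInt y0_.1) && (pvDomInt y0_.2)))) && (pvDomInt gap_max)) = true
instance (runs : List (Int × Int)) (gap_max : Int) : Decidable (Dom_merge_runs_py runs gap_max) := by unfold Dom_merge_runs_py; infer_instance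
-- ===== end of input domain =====

-- B replaces A's flat rewrite-merged[-1] loop by a recursive group-at-a-time scheme: scan the leading mergeable chain, emit its span, recurse on the rest (alternative decomposition, same cost).


-- ===== PORT A =====
-- A's loop: merged[-1] is carried as `last`, the already-final prefix as `acc`
def mergeAGo (g : Int) (acc : List (Int × Int)) (last : Int × Int) : List (Int × Int) → List (Int × Int)
  | [] => acc ++ [last]
  | (s, e) :: rest =>
    if s - last.2 - 1 ≤ g then mergeAGo g acc (last.1, e) rest
    else mergeAGo g (acc ++ [last]) (s, e) rest

def merge_runs_py (runs : List (Int × Int)) (gap_max : Int) : List (Int × Int) :=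
  match runs with
  | [] => []
  | r :: rest => mergeAGo gap_max [] r rest

-- ===== PORT B =====
-- B's inner while: given previous end `pe`, consume the mergeable chain;
-- return the chain's last end and the runs after the chain
def chainB (g pe : Int) : List (Int × Int) → Int × List (Int × Int)
  | [] => (pe, [])
  | (s, e) :: rest =>
    if s - pe - 1 ≤ g then chainB g e rest else (pe, (s, e) :: rest)

theorem chainB_len_le (g pe : Int) : ∀ (l : List (Int × Int)), (chainB g pe l).2.length ≤ l.length := by
  intro l
  induction l generalizing pe with
  | nil => simp [chainB]
  | cons r rest ih =>
    obtain ⟨s, e⟩ := r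
    by_cases h : s - pe - 1 ≤ g
    · rw [chainB, if_pos h]
      exact le_trans (ih e) (by simp)
    · rw [chainB, if_neg h]

-- B's outer recursion: emit the first group's span, recurse on the remainder
def merge_runs_py_alt (runs : List (Int × Int)) (gap_max : Int) : List (Int × Int) :=
  match runs with
  | [] => []
  | (s, e) :: rest =>
    let c := chainB gap_max e rest
    (s, c.1) :: merge_runs_py_alt c.2 gap_max
termination_by runs.length
decreasing_by
  exact Nat.lt_succ_of_le (chainB_len_le gap_max e rest)

-- ===== PRECONDITION & SPEC =====
def Spec_merge_runs_py (runs : List (Int × Int)) (gap_max : Int) (out : List (Int × Int)) : Prop := out = merge_runs_py_alt runs gap_max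
instance (runs : List (Int × Int)) (gap_max : Int) (out : List (Int × Int)) : Decidable (Spec_merge_runs_py runs gap_max out) := by unfold Spec_merge_runs_py; infer_instance

-- ===== CLAIM (what is proved, stated in full; the proofs are below) =====
def Claim_equal_merge_runs_py : Prop := ∀ (runs : List (Int × Int)) (gap_max : Int), Dom_merge_runs_py runs gap_max → Spec_merge_runs_py runs gap_max (merge_runs_py runs gap_max)

-- ===== LEMMAS AND PROOFS =====
theorem alt_nil (g : Int) : merge_runs_py_alt [] g = [] := by
  rw [merge_runs_py_alt.eq_def]

theorem alt_cons (g s e : Int) (rest : List (Int × Int)) :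
    merge_runs_py_alt ((s, e) :: rest) g
      = (s, (chainB g e rest).1) :: merge_runs_py_alt (chainB g e rest).2 g := by
  rw [merge_runs_py_alt.eq_def]

theorem mergeGo_eq (g : Int) : ∀ (rest acc : List (Int × Int)) (gs pe : Int),
    mergeAGo g acc (gs, pe) rest
      = acc ++ ((gs, (chainB g pe rest).1) :: merge_runs_py_alt (chainB g pe rest).2 g) := by
  intro rest
  induction rest with
  | nil => intro acc gs pe; simp [mergeAGo, chainB, alt_nil]
  | cons r rest ih =>
    intro acc gs pe
    obtain ⟨s, e⟩ := r
    by_cases h : s - pe - 1 ≤ g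
    · rw [mergeAGo, if_pos h, chainB, if_pos h]
      exact ih acc gs e
    · rw [mergeAGo, if_neg h, chainB, if_neg h, ih (acc ++ [(gs, pe)]) s e, alt_cons]
      simp

-- ===== VERDICT (by name: the statement is the Claim_ definition above) =====
theorem merge_runs_py_spec : Claim_equal_merge_runs_py := by
  intro runs gap_max _
  unfold Spec_merge_runs_py
  match runs with
  | [] => rw [alt_nil]; rfl
  | (s, e) :: rest =>
    rw [alt_cons]
    simpa using mergeGo_eq gap_max rest [] s e
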